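-- pv_equiv track=rewrite | github.com/saravanan574/Smart-Placement | ai-service/app.py | check_with_synonyms
-- ===== SOURCE A (Python) =====
-- def check_with_synonyms(skill, student_skills_set, synonyms):
--     skill_lower = skill.lower()
--     if skill_lower in student_skills_set:
--         return True
--     if skill_lower in synonyms:
--         for alias in synonyms[skill_lower]:
--             if alias.lower() in student_skills_set:
--                 return True
--     for canonical, aliases in synonyms.items():
--         if skill_lower in [a.lower() for a in aliases]:
--             if canonical in student_skills_set:
--                 return True
--     return False
-- ===== SOURCE B (Python) =====
-- def check_with_synonyms(skill, student_skills_set, synonyms):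
--     skill_lower = skill.lower()
--     candidates = {skill_lower}
--     for canonical, aliases in synonyms.items():
--         lowered = [a.lower() for a in aliases]
--         if canonical == skill_lower:
--             candidates.update(lowered)
--         if skill_lower in lowered:
--             candidates.add(canonical)
--     return not student_skills_set.isdisjoint(candidates)
-- ===== Notes on version B (the rewrite author's own statement) =====
-- stated objective: simpler
-- what changed: Replaces A's three early-return stages (direct test, keyed lookup plus alias scan, second full scan over the dict) by a single pass over synonyms.items() that collects all candidate matches into one set, finishing with a single isdisjoint test against the student skills.
import Mathlib
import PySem

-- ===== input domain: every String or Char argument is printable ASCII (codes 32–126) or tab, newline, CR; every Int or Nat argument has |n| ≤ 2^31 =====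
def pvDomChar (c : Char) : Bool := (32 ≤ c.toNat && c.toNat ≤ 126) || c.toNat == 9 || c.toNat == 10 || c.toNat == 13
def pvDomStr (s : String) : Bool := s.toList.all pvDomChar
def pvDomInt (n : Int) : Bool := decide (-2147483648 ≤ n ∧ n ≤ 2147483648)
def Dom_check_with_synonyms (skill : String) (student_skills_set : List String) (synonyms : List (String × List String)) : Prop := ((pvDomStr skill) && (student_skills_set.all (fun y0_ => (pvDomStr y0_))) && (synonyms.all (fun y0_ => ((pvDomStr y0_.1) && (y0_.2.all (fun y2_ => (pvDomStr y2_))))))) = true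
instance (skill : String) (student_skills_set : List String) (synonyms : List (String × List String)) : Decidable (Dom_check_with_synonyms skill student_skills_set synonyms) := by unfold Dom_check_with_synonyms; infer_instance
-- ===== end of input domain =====

-- B replaces A's three early-return stages by one pass over synonyms.items() collecting a
-- candidate set, then a single isdisjoint test (objective: simpler decomposition, same cost).

-- ===== PORT A =====
def check_with_synonyms (skill : String) (student_skills_set : List String) (synonyms : List (String × List String)) : Bool :=
  let skill_lower := PySem.Str.lower skill
  if student_skills_set.contains skill_lower then true
  else
    let d := PySem.Dict.ofList synonyms
    -- synonyms[skill_lower] is only read under the 'skill_lower in synonyms' guard, where getD = d[k]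
    let hit1 : Bool :=
      if d.contains skill_lower then
        (d.getD skill_lower []).any (fun al => student_skills_set.contains (PySem.Str.lower al))
      else false
    if hit1 then true
    else d.items.any (fun p =>
      (p.2.map PySem.Str.lower).contains skill_lower && student_skills_set.contains p.1)

-- ===== PORT B =====
def check_with_synonyms_alt (skill : String) (student_skills_set : List String) (synonyms : List (String × List String)) : Bool :=
  let skill_lower := PySem.Str.lower skill
  let candidates := (PySem.Dict.ofList synonyms).items.foldl
    (fun (c : PySem.Set String) p =>
      let lowered := p.2.map PySem.Str.lower
      let c := if p.1 == skill_lower then PySem.Set.update c lowered else c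
      if lowered.contains skill_lower then PySem.Set.add c p.1 else c)
    (PySem.Set.add PySem.Set.empty skill_lower)
  !(PySem.Set.isdisjoint student_skills_set candidates)

-- ===== PRECONDITION & SPEC =====
def Spec_check_with_synonyms (skill : String) (student_skills_set : List String) (synonyms : List (String × List String)) (out : Bool) : Prop := out = check_with_synonyms_alt skill student_skills_set synonyms
instance (skill : String) (student_skills_set : List String) (synonyms : List (String × List String)) (out : Bool) : Decidable (Spec_check_with_synonyms skill student_skills_set synonyms out) := by unfold Spec_check_with_synonyms; infer_instance

-- ===== CLAIM (what is proved, stated in full; the proofs are below) =====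
def Claim_equal_check_with_synonyms : Prop := ∀ (skill : String) (student_skills_set : List String) (synonyms : List (String × List String)), Dom_check_with_synonyms skill student_skills_set synonyms → Spec_check_with_synonyms skill student_skills_set synonyms (check_with_synonyms skill student_skills_set synonyms)

-- ===== LEMMAS AND PROOFS =====

-- membership after one step of B's candidate-collecting fold
theorem pv_step_mem (sl x : String) (c : PySem.Set String) (p : String × List String) :
    x ∈ (let lowered := p.2.map PySem.Str.lower
         let c' := if p.1 == sl then PySem.Set.update c lowered else c
         if lowered.contains sl then PySem.Set.add c' p.1 else c')
    ↔ x ∈ c ∨ (p.1 = sl ∧ x ∈ p.2.map PySem.Str.lower) ∨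
        (sl ∈ p.2.map PySem.Str.lower ∧ x = p.1) := by
  by_cases h1 : p.1 = sl <;> by_cases h2 : sl ∈ p.2.map PySem.Str.lower <;>
      simp [h1, h2, PySem.Set.mem_add, PySem.Set.mem_update] <;> try tauto
  obtain ⟨b, hb, hbs⟩ := List.mem_map.1 h2
  constructor
  · rintro (h | h)
    · exact Or.inl h
    · exact Or.inr (Or.inl h)
  · rintro (h | h | rfl)
    · exact Or.inl h
    · exact Or.inr h
    · exact Or.inr ⟨b, hb, hbs⟩

-- membership in B's candidate fold over the whole items list
theorem pv_fold_mem (sl : String) (l : List (String × List String)) (c : PySem.Set String) (x : String) :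
    x ∈ l.foldl
      (fun (c : PySem.Set String) p =>
        let lowered := p.2.map PySem.Str.lower
        let c := if p.1 == sl then PySem.Set.update c lowered else c
        if lowered.contains sl then PySem.Set.add c p.1 else c) c
    ↔ x ∈ c ∨ ∃ p ∈ l, (p.1 = sl ∧ x ∈ p.2.map PySem.Str.lower) ∨
        (sl ∈ p.2.map PySem.Str.lower ∧ x = p.1) := by
  induction l generalizing c with
  | nil => simp
  | cons hd tl ih =>
    rw [List.foldl_cons, ih, pv_step_mem sl x c hd]
    simp only [List.exists_mem_cons_iff]
    exact or_assoc

-- B returns true iff some student skill is skill_lower, a lowered alias of the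
-- skill_lower entry, or the canonical of an entry whose lowered aliases contain skill_lower
theorem pv_B_iff (skill : String) (sset : List String) (syns : List (String × List String)) :
    check_with_synonyms_alt skill sset syns = true ↔
      (∃ x ∈ sset, x = PySem.Str.lower skill ∨
        ∃ p ∈ (PySem.Dict.ofList syns).items,
          (p.1 = PySem.Str.lower skill ∧ x ∈ p.2.map PySem.Str.lower) ∨
          (PySem.Str.lower skill ∈ p.2.map PySem.Str.lower ∧ x = p.1)) := by
  unfold check_with_synonyms_alt
  simp only [Bool.not_eq_true', ← Bool.not_eq_true, PySem.Set.isdisjoint_iff]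
  push_neg
  constructor
  · rintro ⟨x, hx, hmem⟩
    refine ⟨x, hx, ?_⟩
    rcases (pv_fold_mem _ _ _ _).1 hmem with h | h
    · left; simpa [PySem.Set.mem_add, PySem.Set.empty] using h
    · exact Or.inr h
  · rintro ⟨x, hx, h⟩
    refine ⟨x, hx, (pv_fold_mem _ _ _ _).2 ?_⟩
    rcases h with h | h
    · exact Or.inl (by simp [PySem.Set.mem_add, PySem.Set.empty, h])
    · exact Or.inr h

-- the second loop of A, characterised
theorem pv_loop_iff (sl : String) (sset : List String) (items : List (String × List String)) :
    (items.any fun p => (p.2.map PySem.Str.lower).contains sl && sset.contains p.1) = true ↔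
      ∃ x ∈ sset, ∃ p ∈ items, sl ∈ p.2.map PySem.Str.lower ∧ x = p.1 := by
  rw [List.any_eq_true]
  constructor
  · rintro ⟨p, hp, hcond⟩
    rw [Bool.and_eq_true] at hcond
    exact ⟨p.1, by simpa using hcond.2, p, hp, by simpa using hcond.1, rfl⟩
  · rintro ⟨x, hx, p, hp, h1, rfl⟩
    exact ⟨p, hp, by simp [h1]; simpa using hx⟩

-- A returns true under the same characterisation
theorem pv_A_iff (skill : String) (sset : List String) (syns : List (String × List String)) :
    check_with_synonyms skill sset syns = true ↔
      (∃ x ∈ sset, x = PySem.Str.lower skill ∨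
        ∃ p ∈ (PySem.Dict.ofList syns).items,
          (p.1 = PySem.Str.lower skill ∧ x ∈ p.2.map PySem.Str.lower) ∨
          (PySem.Str.lower skill ∈ p.2.map PySem.Str.lower ∧ x = p.1)) := by
  unfold check_with_synonyms
  have hn : (PySem.Dict.ofList syns).keys.Nodup := PySem.Dict.nodup_keys_ofList syns
  by_cases h0 : sset.contains (PySem.Str.lower skill)
  · simp only [h0, if_true, true_iff]
    exact ⟨PySem.Str.lower skill, by simpa using h0, Or.inl rfl⟩
  · have h0' : PySem.Str.lower skill ∉ sset := by simpa using h0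
    simp only [h0, Bool.false_eq_true, if_false]
    by_cases hc : (PySem.Dict.ofList syns).contains (PySem.Str.lower skill)
    · have hcs : ((PySem.Dict.ofList syns).get? (PySem.Str.lower skill)).isSome = true := by
        rw [← PySem.Dict.contains_eq_isSome_get?]; exact hc
      obtain ⟨v, hv⟩ := Option.isSome_iff_exists.1 hcs
      have hgd := PySem.Dict.getD_of_get?_eq_some (PySem.Dict.ofList syns) ([] : List String) hv
      have hvm : (PySem.Str.lower skill, v) ∈ (PySem.Dict.ofList syns).items :=
        (PySem.Dict.get?_eq_some_iff_mem_items _ _ _ hn).1 hv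
      simp only [hc, if_true, hgd]
      by_cases h1 : v.any (fun al => sset.contains (PySem.Str.lower al)) = true
      · simp only [h1, if_true, true_iff]
        obtain ⟨a, ha, hasl⟩ := List.any_eq_true.1 h1
        exact ⟨PySem.Str.lower a, by simpa using hasl,
          Or.inr ⟨_, hvm, Or.inl ⟨rfl, List.mem_map_of_mem ha⟩⟩⟩
      · simp only [Bool.not_eq_true] at h1
        simp only [h1, Bool.false_eq_true, if_false]
        rw [pv_loop_iff]
        constructor
        · rintro ⟨x, hx, p, hp, hmem, hx1⟩
          exact ⟨x, hx, Or.inr ⟨p, hp, Or.inr ⟨hmem, hx1⟩⟩⟩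
        · rintro ⟨x, hx, hx0 | ⟨p, hp, ⟨hk, hxin⟩ | ⟨hmem, hx1⟩⟩⟩
          · exact absurd (hx0 ▸ hx) h0'
          · exfalso
            have hpitems : (PySem.Str.lower skill, p.2) ∈ (PySem.Dict.ofList syns).items := by
              rw [← hk]; simpa using hp
            have hget := PySem.Dict.get?_of_mem_items _ hpitems hn
            rw [hv] at hget
            have hvp : v = p.2 := by injection hget
            obtain ⟨a, ha, hax⟩ := List.mem_map.1 hxin
            have hcontra : v.any (fun al => sset.contains (PySem.Str.lower al)) = true :=
              List.any_eq_true.2 ⟨a, hvp ▸ ha, by simpa [hax] using hx⟩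
            rw [h1] at hcontra
            exact Bool.false_ne_true hcontra
          · exact ⟨x, hx, p, hp, hmem, hx1⟩
    · simp only [hc, Bool.false_eq_true, if_false]
      have hnk : PySem.Str.lower skill ∉ (PySem.Dict.ofList syns).keys := by
        intro h; exact hc ((PySem.Dict.contains_iff_mem_keys _ _).2 h)
      rw [pv_loop_iff]
      constructor
      · rintro ⟨x, hx, p, hp, hmem, hx1⟩
        exact ⟨x, hx, Or.inr ⟨p, hp, Or.inr ⟨hmem, hx1⟩⟩⟩
      · rintro ⟨x, hx, hx0 | ⟨p, hp, ⟨hk, hxin⟩ | ⟨hmem, hx1⟩⟩⟩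
        · exact absurd (hx0 ▸ hx) h0'
        · exact absurd (hk ▸ PySem.Dict.mem_keys_of_mem_items _ hp) hnk
        · exact ⟨x, hx, p, hp, hmem, hx1⟩

-- ===== VERDICT (by name: the statement is the Claim_ definition above) =====
theorem check_with_synonyms_spec : Claim_equal_check_with_synonyms := by
  intro skill sset syns _
  unfold Spec_check_with_synonyms
  have h := (pv_A_iff skill sset syns).trans (pv_B_iff skill sset syns).symm
  rcases hb : check_with_synonyms_alt skill sset syns with _ | _ <;>
    rcases ha : check_with_synonyms skill sset syns with _ | _ <;>
      simp_all
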